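-- pv_equiv track=rewrite | github.com/huangziwei/lmpy | hea/lme.py | _theta_diag_idx
-- ===== SOURCE A (Python) =====
-- def _theta_diag_idx(bar_sizes: list[int]) -> list[int]:
--     """0-indexed θ positions on the diagonal of any per-level Λᵀ block.
--
--     ``materialize_bars`` packs each c×c upper-triangular Λᵀ block row by
--     row: ``θ[off+0] = (0,0)``, ``θ[off+1] = (0,1)``, … . The diagonal
--     positions therefore start each row, at cumulative offsets ``c, c-1,
--     c-2, …``.
--     """
--     diag: list[int] = []
--     off = 0
--     for c in bar_sizes:
--         cum = 0
--         for i in range(c):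
--             diag.append(off + cum)
--             cum += c - i
--         off += c * (c + 1) // 2
--     return diag
-- ===== SOURCE B (Python) =====
-- def _theta_diag_idx(bar_sizes: list[int]) -> list[int]:
--     """0-indexed θ positions on the diagonal of any per-level Λᵀ block.
--
--     Two phases: first compute the starting offset of each triangular block,
--     then emit each block's diagonal positions by the closed form
--     off + i*c - i*(i-1)//2 (the partial sum of c, c-1, c-2, …).
--     """
--     offs: list[int] = []
--     off = 0
--     for c in bar_sizes:
--         offs.append(off)
--         off += c * (c + 1) // 2
--     return [o + i * c - i * (i - 1) // 2
--             for c, o in zip(bar_sizes, offs)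
--             for i in range(c)]
-- ===== Notes on version B (the rewrite author's own statement) =====
-- stated objective: simpler
-- what changed: Replaces the inner running-sum accumulator (cum += c-i) with the closed form off + i*c - i*(i-1)//2, emitting the result as one flat comprehension over a precomputed list of block offsets.
import Mathlib
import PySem

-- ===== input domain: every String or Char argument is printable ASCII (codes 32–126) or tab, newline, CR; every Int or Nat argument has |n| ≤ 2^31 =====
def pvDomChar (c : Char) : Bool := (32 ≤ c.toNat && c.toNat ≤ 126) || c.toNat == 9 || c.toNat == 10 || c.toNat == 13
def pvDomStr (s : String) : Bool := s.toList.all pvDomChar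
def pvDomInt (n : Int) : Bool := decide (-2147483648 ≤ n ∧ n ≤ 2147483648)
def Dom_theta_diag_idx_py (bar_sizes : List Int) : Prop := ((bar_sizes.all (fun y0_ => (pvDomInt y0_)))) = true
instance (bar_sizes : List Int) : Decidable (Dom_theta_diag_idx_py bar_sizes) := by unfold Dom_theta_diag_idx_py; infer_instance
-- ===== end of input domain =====

-- B replaces A's inner running-sum accumulator with the closed form off + i*c - i*(i-1)//2
-- over precomputed block offsets (objective: simpler).

-- ===== PORT A =====
-- state: (diag, off); inner loop state: (diag, cum)
def theta_diag_idx_py (bar_sizes : List Int) : List Int :=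
  (bar_sizes.foldl
    (fun (s : List Int × Int) c =>
      (((PySem.List.pyRange 0 c 1).foldl
          (fun (t : List Int × Int) i => (t.1 ++ [s.2 + t.2], t.2 + (c - i)))
          (s.1, 0)).1,
       s.2 + PySem.Int.floordiv (c * (c + 1)) 2))
    ([], 0)).1

-- ===== PORT B =====
def theta_diag_idx_py_alt (bar_sizes : List Int) : List Int :=
  let offs := (bar_sizes.foldl
    (fun (s : List Int × Int) c =>
      (s.1 ++ [s.2], s.2 + PySem.Int.floordiv (c * (c + 1)) 2))
    ([], 0)).1
  (bar_sizes.zip offs).flatMap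
    (fun p => (PySem.List.pyRange 0 p.1 1).map
      (fun i => p.2 + i * p.1 - PySem.Int.floordiv (i * (i - 1)) 2))

-- ===== PRECONDITION & SPEC =====
def Spec_theta_diag_idx_py (bar_sizes : List Int) (out : List Int) : Prop := out = theta_diag_idx_py_alt bar_sizes
instance (bar_sizes : List Int) (out : List Int) : Decidable (Spec_theta_diag_idx_py bar_sizes out) := by unfold Spec_theta_diag_idx_py; infer_instance

-- ===== CLAIM (what is proved, stated in full; the proofs are below) =====
def Claim_equal_theta_diag_idx_py : Prop := ∀ (bar_sizes : List Int), Dom_theta_diag_idx_py bar_sizes → Spec_theta_diag_idx_py bar_sizes (theta_diag_idx_py bar_sizes)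

-- ===== LEMMAS AND PROOFS =====

-- exact halving of an even product
theorem pv_fd_step (n : ℕ) :
    PySem.Int.floordiv (((n : Int) + 1) * n) 2 = PySem.Int.floordiv ((n : Int) * ((n : Int) - 1)) 2 + n := by
  obtain ⟨a, ha⟩ : ∃ a : Int, (n : Int) * ((n : Int) - 1) = 2 * a := by
    rcases Int.even_mul_succ_self ((n : Int) - 1) with ⟨a, ha⟩
    exact ⟨a, by linarith⟩
  have h2 : ((n : Int) + 1) * n = 2 * (a + n) := by linarith
  rw [ha, h2, PySem.Int.floordiv_eq_ediv_of_pos (by norm_num),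
      PySem.Int.floordiv_eq_ediv_of_pos (by norm_num),
      Int.mul_ediv_cancel_left _ (by norm_num), Int.mul_ediv_cancel_left _ (by norm_num)]

-- A's inner loop equals B's closed-form block (over a Nat range), with final cum value
theorem pv_inner (c off : Int) (n : ℕ) (d : List Int) :
    ((List.range n).map (fun k : ℕ => (k : Int))).foldl
      (fun (t : List Int × Int) i => (t.1 ++ [off + t.2], t.2 + (c - i))) (d, 0)
    = (d ++ (List.range n).map (fun k : ℕ => off + (k : Int) * c - PySem.Int.floordiv ((k : Int) * ((k : Int) - 1)) 2),
       (n : Int) * c - PySem.Int.floordiv ((n : Int) * ((n : Int) - 1)) 2) := by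
  induction n with
  | zero => simp [PySem.Int.floordiv]
  | succ n ih =>
    rw [List.range_succ, List.map_append, List.foldl_append, ih]
    simp only [List.map_cons, List.map_nil, List.foldl_cons, List.foldl_nil]
    refine Prod.ext ?_ ?_
    · simp [List.append_assoc]; ring_nf
    · have h := pv_fd_step n
      push_cast
      rw [show ((n : Int) + 1) * ((n : Int) + 1 - 1) = ((n : Int) + 1) * (n : Int) from by ring, h]
      ring

-- pull the diag prefix out of the offs-building fold and record its length
theorem pv_offs (l : List Int) (off : Int) (os : List Int) :
    l.foldl (fun (s : List Int × Int) c => (s.1 ++ [s.2], s.2 + PySem.Int.floordiv (c * (c + 1)) 2)) (os, off)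
    = (os ++ (l.foldl (fun (s : List Int × Int) c => (s.1 ++ [s.2], s.2 + PySem.Int.floordiv (c * (c + 1)) 2)) ([], off)).1,
       (l.foldl (fun (s : List Int × Int) c => (s.1 ++ [s.2], s.2 + PySem.Int.floordiv (c * (c + 1)) 2)) ([], off)).2) := by
  induction l generalizing off os with
  | nil => simp
  | cons c l ih =>
    simp only [List.foldl_cons, List.nil_append]
    rw [ih _ (os ++ [off]), ih _ [off]]
    simp [List.append_assoc]

-- main induction: A's outer fold = d ++ flatMap of B's blocks over zipped offsets
theorem pv_main (l : List Int) (off : Int) (d : List Int) :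
    (l.foldl
      (fun (s : List Int × Int) c =>
        (((PySem.List.pyRange 0 c 1).foldl
            (fun (t : List Int × Int) i => (t.1 ++ [s.2 + t.2], t.2 + (c - i)))
            (s.1, 0)).1,
         s.2 + PySem.Int.floordiv (c * (c + 1)) 2))
      (d, off)).1
    = d ++ (l.zip ((l.foldl (fun (s : List Int × Int) c => (s.1 ++ [s.2], s.2 + PySem.Int.floordiv (c * (c + 1)) 2)) ([], off)).1)).flatMap
        (fun p => (PySem.List.pyRange 0 p.1 1).map
          (fun i => p.2 + i * p.1 - PySem.Int.floordiv (i * (i - 1)) 2)) := by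
  induction l generalizing off d with
  | nil => simp
  | cons c l ih =>
    have hr : PySem.List.pyRange 0 c 1 = (List.range c.toNat).map (fun k : ℕ => (k : Int)) := by
      rw [PySem.List.pyRange_one]
      simp
    simp only [List.foldl_cons, List.nil_append]
    rw [hr, pv_inner c off c.toNat d, ih, pv_offs l _ [off]]
    simp [List.zip_cons_cons, List.flatMap_cons, hr, List.map_map, List.append_assoc,
      Function.comp]

-- ===== VERDICT (by name: the statement is the Claim_ definition above) =====
theorem theta_diag_idx_py_spec : Claim_equal_theta_diag_idx_py := by
  intro bar_sizes _
  show theta_diag_idx_py bar_sizes = theta_diag_idx_py_alt bar_sizes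
  unfold theta_diag_idx_py theta_diag_idx_py_alt
  exact pv_main bar_sizes 0 []
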